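-- pv_equiv track=rewrite | github.com/Jarl-Bjoern/pythonescaperoom_HH9 | rooms/Room_Herold_Schwab.py | Sort_Chars_In_Text
-- ===== SOURCE A (Python) =====
-- def Sort_Chars_In_Text(Text):
--     Word = ""
--     Temp_Array = []
--
--     for Text_Char in Text:
--         if (Text_Char.isupper()): Word += Text_Char
--     for View in range(0, len(Word)):
--         if (f'{View+1} - {Word[View]}' not in Temp_Array):
--             Temp_Array.append(f'{View+1} - {Word[View]}')
--
--     return Temp_Array
-- ===== SOURCE B (Python) =====
-- def Sort_Chars_In_Text(Text):
--     # Single pass: keep a running counter of uppercase chars seen and format on the fly.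
--     count = 0
--     out = []
--     for ch in Text:
--         if ch.isupper():
--             count += 1
--             out.append(f'{count} - {ch}')
--     return out
-- ===== Notes on version B (the rewrite author's own statement) =====
-- stated objective: simpler
-- what changed: One pass with a running counter formats each uppercase char as it is found, replacing A's two sequential passes (build the uppercase string, then loop over range(len) with an index lookup and a never-firing membership dedup).
import Mathlib
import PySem

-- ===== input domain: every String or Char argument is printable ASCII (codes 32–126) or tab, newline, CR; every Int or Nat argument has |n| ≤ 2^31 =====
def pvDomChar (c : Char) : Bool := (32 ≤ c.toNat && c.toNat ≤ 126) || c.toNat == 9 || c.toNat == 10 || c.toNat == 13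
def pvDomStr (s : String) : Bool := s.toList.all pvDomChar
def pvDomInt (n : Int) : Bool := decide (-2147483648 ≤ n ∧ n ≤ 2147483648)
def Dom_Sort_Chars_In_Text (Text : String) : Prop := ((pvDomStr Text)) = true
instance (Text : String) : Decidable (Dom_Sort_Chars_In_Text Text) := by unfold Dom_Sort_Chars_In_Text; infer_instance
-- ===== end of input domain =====

-- B is a single pass with a running counter; A makes two passes plus an index-range loop with a never-firing dedup. Objective: simpler.

-- the f-string f'{n} - {c}', shared formatting helper of both ports
def pvFmt (n : Int) (c : Char) : String := String.ofList (PySem.Int.toChars n ++ [' ', '-', ' ', c])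

-- ===== PORT A =====
def Sort_Chars_In_Text (Text : String) : List String :=
  -- Word = ""; for ch in Text: if ch.isupper(): Word += ch
  let word : List Char := Text.toList.foldl (fun w c => if PySem.Chars.isupper c then w ++ [c] else w) []
  -- Temp_Array = []; for View in range(0, len(Word)): if fmt not in Temp_Array: append
  (PySem.List.pyRange 0 (word.length : Int) 1).foldl
    (fun acc view =>
      if pvFmt (view + 1) (PySem.List.pyGetD word view ' ') ∈ acc then acc
      else acc ++ [pvFmt (view + 1) (PySem.List.pyGetD word view ' ')]) []

-- ===== PORT B =====
def Sort_Chars_In_Text_alt (Text : String) : List String :=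
  -- count = 0; out = []; one pass: if ch.isupper(): count += 1; out.append(fmt)
  (Text.toList.foldl
    (fun (st : Int × List String) c =>
      if PySem.Chars.isupper c then (st.1 + 1, st.2 ++ [pvFmt (st.1 + 1) c]) else st)
    ((0 : Int), ([] : List String))).2

-- ===== PRECONDITION & SPEC =====
def Spec_Sort_Chars_In_Text (Text : String) (out : List String) : Prop := out = Sort_Chars_In_Text_alt Text
instance (Text : String) (out : List String) : Decidable (Spec_Sort_Chars_In_Text Text out) := by unfold Spec_Sort_Chars_In_Text; infer_instance

-- ===== CLAIM (what is proved, stated in full; the proofs are below) =====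
def Claim_equal_Sort_Chars_In_Text : Prop := ∀ (Text : String), Dom_Sort_Chars_In_Text Text → Spec_Sort_Chars_In_Text Text (Sort_Chars_In_Text Text)

-- ===== LEMMAS AND PROOFS =====

-- decimal representation of a natural number, structurally (mirrors Nat.toDigitsCore for base 10)
def pvRep (n : Nat) : List Char :=
  if _h : n < 10 then [Nat.digitChar n]
  else pvRep (n / 10) ++ [Nat.digitChar (n % 10)]
decreasing_by exact Nat.div_lt_self (by omega) (by omega)

lemma pvRep_lt {n : Nat} (h : n < 10) : pvRep n = [Nat.digitChar n] := by
  rw [pvRep]; simp [h]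

lemma pvRep_ge {n : Nat} (h : ¬ n < 10) : pvRep n = pvRep (n / 10) ++ [Nat.digitChar (n % 10)] := by
  rw [pvRep]; simp [h]

lemma pvRep_ne_nil (n : Nat) : pvRep n ≠ [] := by
  by_cases h : n < 10
  · simp [pvRep_lt h]
  · simp [pvRep_ge h]

lemma digitChar_toNat {a : Nat} (h : a < 10) : (Nat.digitChar a).toNat = a + 48 := by
  interval_cases a <;> rfl

lemma digitChar_inj {a b : Nat} (ha : a < 10) (hb : b < 10)
    (h : Nat.digitChar a = Nat.digitChar b) : a = b := by
  have := congrArg Char.toNat h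
  rw [digitChar_toNat ha, digitChar_toNat hb] at this
  omega

lemma pvRep_inj : ∀ (m n : Nat), pvRep m = pvRep n → m = n := by
  intro m
  induction m using Nat.strong_induction_on with
  | _ m ih =>
    intro n h
    by_cases hm : m < 10 <;> by_cases hn : n < 10
    · rw [pvRep_lt hm, pvRep_lt hn] at h
      exact digitChar_inj hm hn (by simpa using h)
    · exfalso
      rw [pvRep_lt hm, pvRep_ge hn] at h
      have hl := congrArg List.length h
      rcases List.exists_cons_of_ne_nil (pvRep_ne_nil (n / 10)) with ⟨a, l, hrep⟩
      rw [hrep] at hl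
      simp only [List.length_append, List.length_cons] at hl
      omega
    · exfalso
      rw [pvRep_ge hm, pvRep_lt hn] at h
      have hl := congrArg List.length h
      rcases List.exists_cons_of_ne_nil (pvRep_ne_nil (m / 10)) with ⟨a, l, hrep⟩
      rw [hrep] at hl
      simp only [List.length_append, List.length_cons] at hl
      omega
    · rw [pvRep_ge hm, pvRep_ge hn] at h
      have h2 := List.append_inj' h (by simp)
      obtain ⟨h3, h4⟩ := h2
      have hdiv : m / 10 = n / 10 :=
        ih (m / 10) (Nat.div_lt_self (by omega) (by omega)) _ h3
      have hmod : m % 10 = n % 10 :=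
        digitChar_inj (Nat.mod_lt _ (by omega)) (Nat.mod_lt _ (by omega)) (by simpa using h4)
      omega

lemma toDigitsCore_eq : ∀ (f n : Nat) (acc : List Char), n < f →
    Nat.toDigitsCore 10 f n acc = pvRep n ++ acc := by
  intro f
  induction f with
  | zero => omega
  | succ f ih =>
    intro n acc h
    by_cases h10 : n < 10
    · have hz : n / 10 = 0 := Nat.div_eq_of_lt h10
      have hm : n % 10 = n := Nat.mod_eq_of_lt h10
      simp [Nat.toDigitsCore, hz, hm, pvRep_lt h10]
    · have hz : n / 10 ≠ 0 := by
        intro hc; have := Nat.lt_of_div_eq_zero (by omega) hc; omega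
      have hlt : n / 10 < f := by
        have := Nat.div_lt_self (show 0 < n by omega) (show 1 < 10 by omega)
        omega
      simp only [Nat.toDigitsCore, hz, if_false]
      rw [ih _ _ hlt, pvRep_ge h10]
      simp

lemma toChars_nonneg (n : Int) (h : 0 ≤ n) : PySem.Int.toChars n = pvRep n.toNat := by
  simp only [PySem.Int.toChars, Nat.toDigits]
  rw [if_neg (by omega), toDigitsCore_eq _ _ _ (Nat.lt_succ_self _)]
  simp

lemma pvFmt_inj_idx {m n : Int} {c d : Char} (hm : 0 ≤ m) (hn : 0 ≤ n)
    (h : pvFmt m c = pvFmt n d) : m = n := by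
  unfold pvFmt at h
  have h2 : PySem.Int.toChars m ++ [' ', '-', ' ', c] = PySem.Int.toChars n ++ [' ', '-', ' ', d] := by
    have h1 := congrArg String.toList h
    simp only [String.toList_ofList] at h1
    exact h1
  have h3 := List.append_inj' h2 (by simp)
  have h4 := h3.1
  rw [toChars_nonneg _ hm, toChars_nonneg _ hn] at h4
  have := pvRep_inj _ _ h4
  omega

-- the list of formatted strings produced from w starting after k already-counted uppercase chars
def pvSpecOut (k : Int) : List Char → List String
  | [] => []
  | c :: cs => pvFmt (k + 1) c :: pvSpecOut (k + 1) cs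

lemma pvSpecOut_append (k : Int) (xs ys : List Char) :
    pvSpecOut k (xs ++ ys) = pvSpecOut k xs ++ pvSpecOut (k + xs.length) ys := by
  induction xs generalizing k with
  | nil => simp [pvSpecOut]
  | cons x xs ih =>
    simp [pvSpecOut, ih (k + 1)]
    ring_nf

lemma not_mem_pvSpecOut {n : Int} {c : Char} :
    ∀ (w : List Char) (k : Int), 0 ≤ k → k + w.length < n → pvFmt n c ∉ pvSpecOut k w := by
  intro w
  induction w with
  | nil => simp [pvSpecOut]
  | cons x xs ih =>
    intro k hk hlt
    simp only [pvSpecOut, List.mem_cons, not_or]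
    constructor
    · intro heq
      have := pvFmt_inj_idx (by omega) (by omega) heq
      simp at hlt; omega
    · exact ih (k + 1) (by omega) (by simp at hlt ⊢; omega)

-- B's fold over the filtered list
lemma B_fold (w : List Char) : ∀ (k : Int) (acc : List String),
    w.foldl (fun (st : Int × List String) c => (st.1 + 1, st.2 ++ [pvFmt (st.1 + 1) c])) (k, acc)
      = (k + w.length, acc ++ pvSpecOut k w) := by
  induction w with
  | nil => intro k acc; simp [pvSpecOut]
  | cons c cs ih =>
    intro k acc
    simp only [List.foldl_cons, ih, pvSpecOut, Prod.mk.injEq]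
    refine ⟨by simp; ring, by simp⟩

-- a fold in which non-p elements leave the state unchanged is a fold over the filtered list
lemma foldl_if_skip {α β : Type} (p : α → Bool) (h : β → α → β) :
    ∀ (l : List α) (st : β),
      l.foldl (fun st c => if p c then h st c else st) st = (l.filter p).foldl h st := by
  intro l
  induction l with
  | nil => intro st; rfl
  | cons x xs ih =>
    intro st
    by_cases hp : p x <;> simp [List.filter, hp, ih]

-- A's index loop with dedup produces exactly pvSpecOut 0 w
lemma A_fold : ∀ (w : List Char),
    (PySem.List.pyRange 0 (w.length : Int) 1).foldl
      (fun acc view =>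
        if pvFmt (view + 1) (PySem.List.pyGetD w view ' ') ∈ acc then acc
        else acc ++ [pvFmt (view + 1) (PySem.List.pyGetD w view ' ')]) []
      = pvSpecOut 0 w := by
  intro w
  induction w using List.reverseRecOn with
  | nil => simp [pvSpecOut, PySem.List.pyRange_one_eq_nil]
  | append_singleton w c ih =>
    have hlen : ((w ++ [c]).length : Int) = (w.length : Int) + 1 := by simp
    rw [hlen, PySem.List.pyRange_one_succ_right (by positivity), List.foldl_append]
    have hcongr :
        (PySem.List.pyRange 0 (w.length : Int) 1).foldl
          (fun acc view =>
            if pvFmt (view + 1) (PySem.List.pyGetD (w ++ [c]) view ' ') ∈ acc then acc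
            else acc ++ [pvFmt (view + 1) (PySem.List.pyGetD (w ++ [c]) view ' ')]) []
        = (PySem.List.pyRange 0 (w.length : Int) 1).foldl
          (fun acc view =>
            if pvFmt (view + 1) (PySem.List.pyGetD w view ' ') ∈ acc then acc
            else acc ++ [pvFmt (view + 1) (PySem.List.pyGetD w view ' ')]) [] := by
      apply PySem.List.foldl_congr_mem
      intro acc x hx
      rw [PySem.List.mem_pyRange_one] at hx
      have hx0 : x = (x.toNat : Int) := by omega
      have hget : PySem.List.pyGetD (w ++ [c]) x ' ' = PySem.List.pyGetD w x ' ' := by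
        rw [hx0, PySem.List.pyGetD_natCast, PySem.List.pyGetD_natCast]
        rw [List.getD_append]
        omega
      rw [hget]
    rw [hcongr, ih]
    have hgetc : PySem.List.pyGetD (w ++ [c]) (w.length : Int) ' ' = c := by
      rw [PySem.List.pyGetD_natCast]
      simp
    rw [List.foldl_cons]
    rw [hgetc]
    rw [if_neg (not_mem_pvSpecOut w 0 le_rfl (by omega))]
    rw [pvSpecOut_append]
    simp [pvSpecOut]

-- ===== VERDICT (by name: the statement is the Claim_ definition above) =====
theorem Sort_Chars_In_Text_spec : Claim_equal_Sort_Chars_In_Text := by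
  intro Text _
  unfold Spec_Sort_Chars_In_Text Sort_Chars_In_Text Sort_Chars_In_Text_alt
  rw [PySem.List.foldl_append_if_eq_filter]
  simp only [List.nil_append]
  rw [A_fold]
  rw [foldl_if_skip (PySem.Chars.isupper)
    (fun (st : Int × List String) c => (st.1 + 1, st.2 ++ [pvFmt (st.1 + 1) c]))]
  rw [B_fold]
  simp
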